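-- pv_equiv track=rewrite | github.com/aadhityasw/Competitive-Programs | questions/q347_thesaurus/code.py | solveInterrior
-- ===== SOURCE A (Python) =====
-- def populateCounts(end) :
--     """
--     Given the maximum number through which the table needs to be populated, we form the table.
--
--     Parameters
--     ----------
--     end - the extent of continuous missing letters in string (or the length of the table needed)
--
--     Return
--     ------
--     table - with i'th index pointing to the number of possible combinations possible for 'i' missing letters
--     """
--
--     # Initialize a table
--     # Element at index i : (edge_same[i], edge_different[i])
--     table = [(None, None), (25, 24)]
--
--     # Populate the table till the given number
--     for i in range(2, end + 1) :
--         table.append((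
--             (25 * table[i-1][1]),
--             ((24 * table[i-1][1]) +  (1 * table[i-1][0]))
--         ))
--
--     # Return the populated table
--     return table
--
-- def getMissingConfiguration(s) :
--     """
--     Given a string, returns all the counts of concecutive missing values in the string, in the form of array.
--     We also include another value indicating if the edges are same or different
--     """
--
--     # Initialize variables for computing and storing the values
--     missing_counts = []
--     n = len(s)
--
--     # Iterate through the loop and find all the missing letter configurations
--     i = 1
--     while i < n-1 :
--         if s[i] == '?' :
--             c = 0
--             left_edge = s[i-1]
--             while i < n-1 and s[i] == '?' :
--                 c += 1
--                 i += 1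
--             right_edge = s[i]
--             missing_counts.append((
--                 c, (True if left_edge == right_edge else False)
--             ))
--         else :
--             i += 1
--
--     # Return the missing congiguration
--     return missing_counts
--
-- def solveInterrior(s) :
--     """
--     Given a string with defined edge characters, we find the number of possible ways in which we can fill the blanks.
--     Assumption : First and last characters are filled
--
--     Parameters
--     ----------
--     s - the string with defined edge letters
--
--     Return
--     ------
--     count - the total number of possible ways to fill the blanks for this edge defined string
--     """
--
--     # Get the missing letters configuration from processing the string
--     missing_count_configuration = getMissingConfiguration(s)
--
--     # Initialize a variable for storing the overall count
--     total_count = 1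
--
--     if len(missing_count_configuration) > 0 :
--
--         # Find the maximum number of concecutive missing characters
--         max_missing_count = max(missing_count_configuration, key=lambda x : x[0])[0]
--
--         # Fill the DP table
--         table = populateCounts(max_missing_count)
--
--         # Compute for every missing configuration
--         for (num_missing, same_edge) in missing_count_configuration :
--             if same_edge :
--                 total_count *= table[num_missing][0]
--             else :
--                 total_count *= table[num_missing][1]
--
--     return total_count
-- ===== SOURCE B (Python) =====
-- def solveInterrior(s):
--     """Closed-form count per run of missing letters: no DP table, no config list."""
--     total = 1
--     n = len(s)
--     i = 1
--     while i < n - 1: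
--         if s[i] == '?':
--             j = i
--             while j < n - 1 and s[j] == '?':
--                 j += 1
--             m = j - i + 1          # run length + 1
--             p = 25 ** m
--             sign = -1 if m % 2 else 1
--             if s[i - 1] == s[j]:
--                 total *= (p + 25 * sign) // 26
--             else:
--                 total *= (p - sign) // 26
--             i = j
--         else:
--             i += 1
--     return total
-- ===== Notes on version B (the rewrite author's own statement) =====
-- stated objective: simpler
-- what changed: B drops A's DP table (populateCounts) and the intermediate configuration list: it scans the string once and, for each run of missing letters, multiplies a closed-form factor ((25^m + 25*(-1)^m)/26 for equal edges, (25^m - (-1)^m)/26 for different edges, m = run length + 1) into the total.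
import Mathlib
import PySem

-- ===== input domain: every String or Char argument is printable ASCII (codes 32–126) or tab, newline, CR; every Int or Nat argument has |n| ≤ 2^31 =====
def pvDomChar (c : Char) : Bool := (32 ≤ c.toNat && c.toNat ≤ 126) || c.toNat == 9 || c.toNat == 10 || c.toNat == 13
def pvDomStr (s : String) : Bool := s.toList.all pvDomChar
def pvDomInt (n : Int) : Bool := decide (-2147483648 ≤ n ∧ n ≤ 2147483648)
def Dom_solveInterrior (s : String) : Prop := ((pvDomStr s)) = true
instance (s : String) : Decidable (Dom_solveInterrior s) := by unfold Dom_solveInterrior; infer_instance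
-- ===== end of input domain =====

-- B replaces A's per-run DP table and configuration list with a closed-form factor per run of missing letters; same values, simpler code.
-- The while loops are ported with an explicit fuel parameter (fuel = len(s) always suffices: i increases every iteration).

-- ===== PORT A =====
-- table[0] is Python's (None, None); it is never read (all looked-up indices are ≥ 1), modeled as (0, 0).
def populateCounts (endv : Int) : List (Int × Int) :=
  (PySem.List.pyRange 2 (endv + 1) 1).foldl
    (fun table i =>
      table ++ [(25 * (PySem.List.pyGetD table (i - 1) ((0 : Int), (0 : Int))).2,
                 24 * (PySem.List.pyGetD table (i - 1) ((0 : Int), (0 : Int))).2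
                   + 1 * (PySem.List.pyGetD table (i - 1) ((0 : Int), (0 : Int))).1)])
    [((0 : Int), (0 : Int)), (25, 24)]

-- inner 'while i < n-1 and s[i] == "?"' loop of getMissingConfiguration (returns (c, i))
def gmcInner (cs : List Char) (n : Nat) : Nat → Nat → Int → Int × Nat
  | 0, i, c => (c, i)
  | fuel + 1, i, c =>
    if i < n - 1 ∧ cs.getD i ' ' = '?' then gmcInner cs n fuel (i + 1) (c + 1) else (c, i)

-- outer while loop of getMissingConfiguration (i starts at 1, so s[i-1] never wraps)
def gmcAux (cs : List Char) (n : Nat) : Nat → Nat → List (Int × Bool) → List (Int × Bool)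
  | 0, _, acc => acc
  | fuel + 1, i, acc =>
    if i < n - 1 then
      if cs.getD i ' ' = '?' then
        gmcAux cs n fuel (gmcInner cs n (fuel + 1) i 0).2
          (acc ++ [((gmcInner cs n (fuel + 1) i 0).1,
                    cs.getD (i - 1) ' ' == cs.getD (gmcInner cs n (fuel + 1) i 0).2 ' ')])
      else gmcAux cs n fuel (i + 1) acc
    else acc

def getMissingConfiguration (s : String) : List (Int × Bool) :=
  gmcAux s.toList s.toList.length s.toList.length 1 []

def solveInterrior (s : String) : Int :=
  let mcc := getMissingConfiguration s
  if mcc.length > 0 then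
    -- mcc is nonempty here, so Python's max() returns an element; max? is some
    let maxMissing := ((PySem.List.max? mcc (fun x => x.1)).getD ((0 : Int), false)).1
    let table := populateCounts maxMissing
    mcc.foldl
      (fun total p =>
        if p.2 then total * (PySem.List.pyGetD table p.1 ((0 : Int), (0 : Int))).1
        else total * (PySem.List.pyGetD table p.1 ((0 : Int), (0 : Int))).2) 1
  else 1

-- ===== PORT B =====
-- inner 'while j < n-1 and s[j] == "?"' loop of B
def altInner (cs : List Char) (n : Nat) : Nat → Nat → Nat
  | 0, j => j
  | fuel + 1, j =>
    if j < n - 1 ∧ cs.getD j ' ' = '?' then altInner cs n fuel (j + 1) else j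

-- B's single while loop: closed-form count per '?'-run, multiplied into total
def altLoop (cs : List Char) (n : Nat) : Nat → Nat → Int → Int
  | 0, _, total => total
  | fuel + 1, i, total =>
    if i < n - 1 then
      if cs.getD i ' ' = '?' then
        let j := altInner cs n (fuel + 1) i
        let m := j - i + 1
        let p : Int := 25 ^ m
        let sign : Int := if m % 2 = 1 then -1 else 1
        altLoop cs n fuel j
          (if cs.getD (i - 1) ' ' = cs.getD j ' '
           then total * PySem.Int.floordiv (p + 25 * sign) 26
           else total * PySem.Int.floordiv (p - sign) 26)
      else altLoop cs n fuel (i + 1) total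
    else total

def solveInterrior_alt (s : String) : Int :=
  altLoop s.toList s.toList.length s.toList.length 1 1

-- ===== PRECONDITION & SPEC =====
def Spec_solveInterrior (s : String) (out : Int) : Prop := out = solveInterrior_alt s
instance (s : String) (out : Int) : Decidable (Spec_solveInterrior s out) := by unfold Spec_solveInterrior; infer_instance

-- ===== CLAIM (what is proved, stated in full; the proofs are below) =====
def Claim_equal_solveInterrior : Prop := ∀ (s : String), Dom_solveInterrior s → Spec_solveInterrior s (solveInterrior s)

-- ===== LEMMAS AND PROOFS =====

-- the DP table entry for a run of k missing letters: (same-edge count, different-edge count)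
def eTab : Nat → Int × Int
  | 0 => (0, 0)
  | 1 => (25, 24)
  | (k + 2) => (25 * (eTab (k + 1)).2, 24 * (eTab (k + 1)).2 + 1 * (eTab (k + 1)).1)

def cf (p : Int × Bool) : Int := if p.2 then (eTab p.1.toNat).1 else (eTab p.1.toNat).2

def cfProd : List (Int × Bool) → Int
  | [] => 1
  | p :: l => cf p * cfProd l

-- closed form for eTab
theorem eTab_closed (c : Nat) (hc : 1 ≤ c) :
    26 * (eTab c).1 = 25 ^ (c + 1) + 25 * (-1 : Int) ^ (c + 1) ∧
    26 * (eTab c).2 = 25 ^ (c + 1) - (-1 : Int) ^ (c + 1) := by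
  induction c, hc using Nat.le_induction with
  | base => decide
  | succ k hk ih =>
    obtain ⟨j, rfl⟩ : ∃ j, k = j + 1 := ⟨k - 1, by omega⟩
    simp only [eTab]
    obtain ⟨ih1, ih2⟩ := ih
    exact ⟨by linear_combination (25 : Int) * ih2,
           by linear_combination (24 : Int) * ih2 + ih1⟩

-- populateCounts is the eTab prefix
theorem populateCounts_eq (k : Nat) (hk : 1 ≤ k) :
    populateCounts (k : Int) = (List.range (k + 1)).map eTab := by
  induction k, hk using Nat.le_induction with
  | base =>
    rw [populateCounts]
    rw [show ((1 : Nat) : Int) + 1 = 2 by norm_num, PySem.List.pyRange_one_eq_nil (by norm_num)]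
    decide
  | succ k hk ih =>
    rw [populateCounts]
    rw [show ((k + 1 : Nat) : Int) + 1 = (((k : Nat) : Int) + 1) + 1 by push_cast; ring]
    rw [PySem.List.pyRange_one_succ_right (by omega : (2 : Int) ≤ (k : Int) + 1)]
    rw [List.foldl_append]
    rw [← populateCounts, ih]
    simp only [List.foldl_cons, List.foldl_nil]
    rw [show ((k : Nat) : Int) + 1 - 1 = ((k : Nat) : Int) by ring]
    rw [PySem.List.pyGetD_natCast]
    have hlt : k < k + 1 := by omega
    have hget : ((List.range (k + 1)).map eTab).getD k ((0 : Int), (0 : Int)) = eTab k := by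
      simp [List.getD, hlt]
    rw [hget]
    obtain ⟨j, rfl⟩ : ∃ j, k = j + 1 := ⟨k - 1, by omega⟩
    simp [List.range_succ, eTab]

theorem altInner_ge (cs : List Char) (n : Nat) :
    ∀ (fuel j : Nat), j ≤ altInner cs n fuel j := by
  intro fuel
  induction fuel with
  | zero => intro j; simp [altInner]
  | succ f ih =>
    intro j
    rw [altInner]
    split
    · exact le_trans (by omega) (ih (j + 1))
    · exact le_refl j

theorem gmcInner_fst_ge (cs : List Char) (n : Nat) :
    ∀ (fuel i : Nat) (c : Int), c ≤ (gmcInner cs n fuel i c).1 := by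
  intro fuel
  induction fuel with
  | zero => intro i c; simp [gmcInner]
  | succ f ih =>
    intro i c
    rw [gmcInner]
    split
    · exact le_trans (by omega) (ih (i + 1) (c + 1))
    · exact le_refl c

-- inner loops of the two ports agree (given enough fuel)
theorem gmcInner_eq (cs : List Char) (n : Nat) :
    ∀ (fuel i : Nat) (c : Int), n - 1 - i ≤ fuel →
      gmcInner cs n fuel i c = (c + ((altInner cs n fuel i - i : Nat) : Int), altInner cs n fuel i) := by
  intro fuel
  induction fuel with
  | zero =>
    intro i c hk
    have h : ¬ (i < n - 1 ∧ cs.getD i ' ' = '?') := fun hcon => by omega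
    simp [gmcInner, altInner]
  | succ f ih =>
    intro i c hk
    rw [gmcInner, altInner]
    by_cases h : i < n - 1 ∧ cs.getD i ' ' = '?'
    · rw [if_pos h, if_pos h, ih (i + 1) (c + 1) (by omega)]
      have hg := altInner_ge cs n f (i + 1)
      rw [Prod.mk.injEq]
      refine ⟨?_, rfl⟩
      have hs : (altInner cs n f (i + 1) - i : Nat) = (altInner cs n f (i + 1) - (i + 1) : Nat) + 1 := by
        omega
      rw [hs]; push_cast; ring
    · rw [if_neg h, if_neg h]
      simp

theorem gmcAux_acc (cs : List Char) (n : Nat) :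
    ∀ (fuel i : Nat) (acc : List (Int × Bool)),
      gmcAux cs n fuel i acc = acc ++ gmcAux cs n fuel i [] := by
  intro fuel
  induction fuel with
  | zero => intro i acc; simp [gmcAux]
  | succ f ih =>
    intro i acc
    conv_lhs => rw [gmcAux]
    conv_rhs => rw [gmcAux]
    by_cases h1 : i < n - 1
    · by_cases h2 : cs.getD i ' ' = '?'
      · simp only [if_pos h1, if_pos h2]
        rw [ih _ (acc ++ _), ih _ ([] ++ _)]
        simp
      · simp only [if_pos h1, if_neg h2]
        exact ih _ acc
    · simp [if_neg h1]

theorem gmc_pos (cs : List Char) (n : Nat) :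
    ∀ (fuel i : Nat), ∀ p ∈ gmcAux cs n fuel i [], 1 ≤ p.1 := by
  intro fuel
  induction fuel with
  | zero => intro i p hp; simp [gmcAux] at hp
  | succ f ih =>
    intro i p hp
    rw [gmcAux] at hp
    by_cases h1 : i < n - 1
    · by_cases h2 : cs.getD i ' ' = '?'
      · rw [if_pos h1, if_pos h2, gmcAux_acc cs n f] at hp
        simp at hp
        rcases hp with rfl | hp
        · have h3 : gmcInner cs n (f + 1) i 0 = gmcInner cs n f (i + 1) 1 := by
            rw [gmcInner, if_pos ⟨h1, h2⟩]; norm_num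
          have h4 := gmcInner_fst_ge cs n f (i + 1) 1
          simp only [h3]
          exact h4
        · exact ih _ p hp
      · rw [if_pos h1, if_neg h2] at hp
        exact ih _ p hp
    · rw [if_neg h1] at hp
      simp at hp

-- B's loop computes the product of closed forms over A's configuration list
theorem altLoop_eq (cs : List Char) (n : Nat) :
    ∀ (fuel i : Nat) (total : Int), n - 1 - i ≤ fuel →
      altLoop cs n fuel i total = total * cfProd (gmcAux cs n fuel i []) := by
  intro fuel
  induction fuel with
  | zero =>
    intro i total hk
    simp [altLoop, gmcAux, cfProd]
  | succ f ih =>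
    intro i total hk
    conv_lhs => rw [altLoop]
    conv_rhs => rw [gmcAux]
    by_cases h1 : i < n - 1
    · by_cases h2 : cs.getD i ' ' = '?'
      · simp only [if_pos h1, if_pos h2]
        have hgi := gmcInner_eq cs n (f + 1) i 0 (by omega)
        simp only [hgi]
        have he : altInner cs n (f + 1) i = altInner cs n f (i + 1) := by
          rw [altInner, if_pos ⟨h1, h2⟩]
        have hg := altInner_ge cs n f (i + 1)
        have h5 : n - 1 - altInner cs n (f + 1) i ≤ f := by rw [he]; omega
        rw [gmcAux_acc cs n f, ih _ _ h5]
        simp only [List.nil_append, List.singleton_append, cfProd]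
        have hJi : i + 1 ≤ altInner cs n (f + 1) i := by rw [he]; exact hg
        obtain ⟨C, hC⟩ : ∃ C, altInner cs n (f + 1) i - i = C := ⟨_, rfl⟩
        have hC1 : 1 ≤ C := by omega
        simp only [hC]
        have htn : ((0 : Int) + ((C : Nat) : Int)).toNat = C := by simp
        have hsign : (if (C + 1) % 2 = 1 then (-1 : Int) else 1) = (-1 : Int) ^ (C + 1) := by
          rcases Nat.even_or_odd (C + 1) with hev | hod
          · have h6 := Nat.even_iff.mp hev
            rw [hev.neg_one_pow, if_neg (by omega)]
          · rw [hod.neg_one_pow, if_pos (Nat.odd_iff.mp hod)]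
        have hdiv : ∀ x : Int, PySem.Int.floordiv (26 * x) 26 = x := fun x => by
          rw [PySem.Int.floordiv_eq_ediv_of_pos (by norm_num)]
          exact Int.mul_ediv_cancel_left _ (by norm_num)
        obtain ⟨hcf1, hcf2⟩ := eTab_closed C hC1
        simp only [cf, htn, hsign]
        by_cases hedge : cs.getD (i - 1) ' ' = cs.getD (altInner cs n (f + 1) i) ' '
        · rw [if_pos hedge, if_pos (by simpa using hedge)]
          rw [← hcf1, hdiv]
          ring
        · rw [if_neg hedge, if_neg (by simpa using hedge)]
          rw [← hcf2, hdiv]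
          ring
      · simp only [if_pos h1, if_neg h2]
        exact ih _ _ (by omega)
    · simp only [if_neg h1]
      simp [cfProd]

-- A's fold over the configuration list is the same product, given the bounds
theorem foldA_eq (M : Nat) (hM : 1 ≤ M) :
    ∀ (mcc : List (Int × Bool)) (t : Int), (∀ p ∈ mcc, 1 ≤ p.1 ∧ p.1 ≤ (M : Int)) →
      mcc.foldl
        (fun total p =>
          if p.2 then total * (PySem.List.pyGetD (populateCounts (M : Int)) p.1 ((0 : Int), (0 : Int))).1
          else total * (PySem.List.pyGetD (populateCounts (M : Int)) p.1 ((0 : Int), (0 : Int))).2) t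
      = t * cfProd mcc := by
  intro mcc
  induction mcc with
  | nil => intro t _; simp [cfProd]
  | cons p l ih =>
    intro t hb
    have hp := hb p (by simp)
    obtain ⟨c, hc⟩ : ∃ c : Nat, p.1 = (c : Int) := ⟨p.1.toNat, by omega⟩
    have hlt : c < M + 1 := by omega
    have hlookup : PySem.List.pyGetD (populateCounts (M : Int)) ((c : Nat) : Int)
        ((0 : Int), (0 : Int)) = eTab c := by
      rw [populateCounts_eq M hM, PySem.List.pyGetD_natCast]
      simp [List.getD, hlt]
    simp only [List.foldl_cons]
    rw [ih _ (fun q hq => hb q (by simp [hq]))]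
    simp only [cfProd, cf, hc, Int.toNat_natCast, hlookup]
    by_cases h : p.2
    · simp only [if_pos h]; ring
    · simp only [if_neg h]; ring

-- ===== VERDICT (by name: the statement is the Claim_ definition above) =====
theorem solveInterrior_spec : Claim_equal_solveInterrior := by
  intro s _
  unfold Spec_solveInterrior solveInterrior solveInterrior_alt getMissingConfiguration
  rw [altLoop_eq s.toList s.toList.length s.toList.length 1 1 (by omega)]
  dsimp only []
  by_cases hlen : (gmcAux s.toList s.toList.length s.toList.length 1 []).length > 0
  · rw [if_pos hlen]
    have hne : gmcAux s.toList s.toList.length s.toList.length 1 [] ≠ [] := by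
      intro h; rw [h] at hlen; simp at hlen
    obtain ⟨m, hm⟩ : ∃ m, PySem.List.max? (gmcAux s.toList s.toList.length s.toList.length 1 [])
        (fun x => x.1) = some m := by
      cases hq : PySem.List.max? (gmcAux s.toList s.toList.length s.toList.length 1 [])
          (fun x => x.1) with
      | none => exact absurd ((PySem.List.max?_eq_none_iff _ _).mp hq) hne
      | some m => exact ⟨m, rfl⟩
    rw [hm]
    simp only [Option.getD_some]
    have hmem := PySem.List.max?_mem hm
    have hmax := PySem.List.max?_isMax hm
    have hpos := gmc_pos s.toList s.toList.length s.toList.length 1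
    have hm1 : 1 ≤ m.1 := hpos m hmem
    have hMc : m.1 = ((m.1.toNat : Nat) : Int) := by omega
    rw [hMc]
    rw [foldA_eq m.1.toNat (by omega) _ 1
      (fun p hp => ⟨hpos p hp, by rw [← hMc]; exact hmax p hp⟩)]
  · rw [if_neg hlen]
    have h0 : gmcAux s.toList s.toList.length s.toList.length 1 [] = [] :=
      List.eq_nil_of_length_eq_zero (by omega)
    rw [h0]
    simp [cfProd]
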